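-- pv_equiv track=rewrite | github.com/larson-group/clubb_release | postprocessing/pyplotgen/Plotter.py | getStartEndIndex
-- ===== SOURCE A (Python) =====
-- def getStartEndIndex(data, start_value, end_value):
--     '''
--     Get the list floor index that contains the value to start graphing at and the
--     ceiling index that contains the end value to stop graphing at
--
--     If neither are found, returns the entire array back
--     :param start_value: The first value to be graphed (may return indexes to values smaller than this)
--     :param end_value: The last value that needs to be graphed (may return indexes to values larger than this)
--     :return: (tuple) start_idx, end_idx   which contains the starting and ending
--     index representing the start and end time passed into the function
--     '''
--     start_idx = 0
--     end_idx = len(data) -1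
--     for i in range(0,len(data)):
--             # Check for start index
--             test_value = data[i]
--             if test_value <= start_value and test_value > data[start_idx]:
--                 start_idx = i
--             # Check for end index
--             if test_value >= end_value and test_value < data[end_idx]:
--                 end_idx = i
--
--     return start_idx, end_idx
-- ===== SOURCE B (Python) =====
-- def getStartEndIndex(data, start_value, end_value):
--     start_idx = 0
--     end_idx = len(data) - 1
--     if data:
--         if data[0] <= start_value:
--             best = max(v for v in data if v <= start_value)
--             if best > data[0]:
--                 start_idx = data.index(best)
--         if data[-1] >= end_value:
--             best = min(v for v in data if v >= end_value)
--             if best < data[-1]: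
--                 end_idx = data.index(best)
--     return start_idx, end_idx
-- ===== Notes on version B (the rewrite author's own statement) =====
-- stated objective: idiomatic
-- what changed: Replaces A's single stateful argmax/argmin loop (which compares each element against the value at the currently stored index) by a direct computation: filter the qualifying values, take max/min with the builtins, and locate its first index with list.index, guarded by the closed-form conditions on data[0]/data[-1] under which A can update at all.
import Mathlib
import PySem

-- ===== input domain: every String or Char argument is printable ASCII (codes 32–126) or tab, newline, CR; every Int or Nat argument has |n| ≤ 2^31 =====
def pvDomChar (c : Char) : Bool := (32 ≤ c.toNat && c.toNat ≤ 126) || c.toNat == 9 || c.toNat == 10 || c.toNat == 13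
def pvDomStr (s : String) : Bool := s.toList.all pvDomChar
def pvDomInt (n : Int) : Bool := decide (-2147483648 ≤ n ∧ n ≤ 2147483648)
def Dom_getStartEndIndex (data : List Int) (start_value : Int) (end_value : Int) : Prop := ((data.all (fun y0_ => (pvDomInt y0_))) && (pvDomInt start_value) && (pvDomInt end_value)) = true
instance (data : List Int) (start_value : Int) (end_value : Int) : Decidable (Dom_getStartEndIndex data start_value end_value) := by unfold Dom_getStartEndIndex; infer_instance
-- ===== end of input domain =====

-- B replaces A's stateful argmax/argmin scan by filter + max/min + first-index; same O(n), plainer (objective: idiomatic).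

-- ===== PORT A =====
-- data[j] for an index A keeps in its state; every such access is in range in A, so the
-- default of getD is never used (pyGet? is exact Python indexing).
def pvGetv (data : List Int) (j : Int) : Int := (PySem.List.pyGet? data j).getD 0

def getStartEndIndex (data : List Int) (start_value : Int) (end_value : Int) : Int × Int :=
  (PySem.List.pyRange 0 data.length 1).foldl
    (fun (st : Int × Int) i =>
      let test_value := pvGetv data i
      let st1 := if test_value ≤ start_value ∧ test_value > pvGetv data st.1 then (i, st.2) else st
      if test_value ≥ end_value ∧ test_value < pvGetv data st1.2 then (st1.1, i) else st1)
    (0, (data.length : Int) - 1)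

-- ===== PORT B =====
def getStartEndIndex_alt (data : List Int) (start_value : Int) (end_value : Int) : Int × Int :=
  let start_idx : Int := 0
  let end_idx : Int := (data.length : Int) - 1
  match data with
  | [] => (start_idx, end_idx)
  | d0 :: t =>
    let last := (d0 :: t).getLast (List.cons_ne_nil d0 t)
    let start_idx :=
      if d0 ≤ start_value then
        -- max(...) over a nonempty generator: d0 itself qualifies
        let best := (PySem.List.max? ((d0 :: t).filter (fun v => decide (v ≤ start_value))) (fun v => v)).getD d0
        if best > d0 then (((PySem.List.index? (d0 :: t) best).getD 0 : Nat) : Int) else start_idx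
      else start_idx
    let end_idx :=
      if last ≥ end_value then
        let best := (PySem.List.min? ((d0 :: t).filter (fun v => decide (v ≥ end_value))) (fun v => v)).getD last
        if best < last then (((PySem.List.index? (d0 :: t) best).getD 0 : Nat) : Int) else end_idx
      else end_idx
    (start_idx, end_idx)

-- ===== PRECONDITION & SPEC =====
def Spec_getStartEndIndex (data : List Int) (start_value : Int) (end_value : Int) (out : Int × Int) : Prop := out = getStartEndIndex_alt data start_value end_value
instance (data : List Int) (start_value : Int) (end_value : Int) (out : Int × Int) : Decidable (Spec_getStartEndIndex data start_value end_value out) := by unfold Spec_getStartEndIndex; infer_instance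

-- ===== CLAIM (what is proved, stated in full; the proofs are below) =====
def Claim_equal_getStartEndIndex : Prop := ∀ (data : List Int) (start_value : Int) (end_value : Int), Dom_getStartEndIndex data start_value end_value → Spec_getStartEndIndex data start_value end_value (getStartEndIndex data start_value end_value)

-- ===== LEMMAS AND PROOFS =====

def dget (data : List Int) (k : Nat) : Int := data.getD k 0

lemma pvGetv_natCast (data : List Int) (k : Nat) : pvGetv data ((k : Nat) : Int) = dget data k := by
  simp [pvGetv, dget, List.getD]

lemma foldl_max_choice (l : List Int) (b : Int) : l.foldl max b = b ∨ l.foldl max b ∈ l := by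
  induction l generalizing b with
  | nil => left; rfl
  | cons x t ih =>
    rcases ih (max b x) with h | h
    · rcases Int.lt_or_le b x with hxb | hxb
      · right; rw [List.foldl_cons, h, max_eq_right hxb.le]; exact List.mem_cons_self
      · left; rw [List.foldl_cons, h, max_eq_left hxb]
    · right; rw [List.foldl_cons]; exact List.mem_cons_of_mem _ h

lemma foldl_min_choice (l : List Int) (b : Int) : l.foldl min b = b ∨ l.foldl min b ∈ l := by
  induction l generalizing b with
  | nil => left; rfl
  | cons x t ih =>
    rcases ih (min b x) with h | h
    · rcases Int.lt_or_le x b with hxb | hxb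
      · right; rw [List.foldl_cons, h, min_eq_right hxb.le]; exact List.mem_cons_self
      · left; rw [List.foldl_cons, h, min_eq_left hxb]
    · right; rw [List.foldl_cons]; exact List.mem_cons_of_mem _ h

lemma foldl_min_le (l : List Int) (b : Int) : l.foldl min b ≤ b := by
  induction l generalizing b with
  | nil => simp [List.foldl]
  | cons x t ih => exact le_trans (ih (min b x)) (min_le_left b x)

lemma foldl_pair_split {α : Type} (l : List α) (f g : Int → α → Int) (a b : Int) :
    l.foldl (fun st x => (f st.1 x, g st.2 x)) (a, b) = (l.foldl f a, l.foldl g b) := by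
  induction l generalizing a b with
  | nil => rfl
  | cons x t ih => simpa using ih (f a x) (g b x)

def maxCand (data : List Int) (s : Int) (ks : List Nat) (b : Int) : Int :=
  ((ks.map (dget data)).filter (fun v => decide (v ≤ s))).foldl max b

def minCand (data : List Int) (e : Int) (ks : List Nat) (b : Int) : Int :=
  ((ks.map (dget data)).filter (fun v => decide (v ≥ e))).foldl min b

def firstAt (data : List Int) (ks : List Nat) (M : Int) : Int :=
  (((ks.find? (fun k => dget data k == M)).getD 0 : Nat) : Int)

lemma startFold (data : List Int) (s : Int) :
    ∀ (ks : List Nat) (j : Nat),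
      ks.foldl (fun (a : Int) (k : Nat) =>
          if dget data k ≤ s ∧ dget data k > pvGetv data a then ((k : Nat) : Int) else a) ((j : Nat) : Int)
      = (if dget data j < maxCand data s ks (dget data j)
         then firstAt data ks (maxCand data s ks (dget data j)) else ((j : Nat) : Int)) := by
  intro ks
  induction ks with
  | nil => intro j; simp [maxCand]
  | cons k ks ih =>
    intro j
    rw [List.foldl_cons]
    simp only [pvGetv_natCast]
    by_cases hc : dget data k ≤ s ∧ dget data k > dget data j
    · rw [if_pos hc, ih k]
      have hM : maxCand data s (k :: ks) (dget data j) = maxCand data s ks (dget data k) := by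
        unfold maxCand
        rw [List.map_cons, List.filter_cons_of_pos (by simpa using hc.1), List.foldl_cons,
          max_eq_right (le_of_lt hc.2)]
      rw [hM]
      have hk_le : dget data k ≤ maxCand data s ks (dget data k) :=
        (PySem.List.le_foldl_max _ _).1
      rcases eq_or_lt_of_le hk_le with he | hlt
      · rw [if_neg (by omega), if_pos (by omega)]
        unfold firstAt
        rw [List.find?_cons_of_pos (by simp [← he])]
        rfl
      · rw [if_pos hlt, if_pos (lt_trans hc.2 hlt)]
        unfold firstAt
        rw [List.find?_cons_of_neg (by simp; exact fun h => absurd h (ne_of_lt hlt))]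
    · rw [if_neg hc, ih j]
      by_cases hks : dget data k ≤ s
      · have hjk : dget data k ≤ dget data j := by
          rcases not_and_or.mp hc with h | h
          · exact absurd hks h
          · omega
        have hM : maxCand data s (k :: ks) (dget data j) = maxCand data s ks (dget data j) := by
          unfold maxCand
          rw [List.map_cons, List.filter_cons_of_pos (by simpa using hks), List.foldl_cons,
            max_eq_left hjk]
        rw [hM]
        by_cases hlt : dget data j < maxCand data s ks (dget data j)
        · rw [if_pos hlt, if_pos hlt]
          unfold firstAt
          rw [List.find?_cons_of_neg (by simp; omega)]
        · rw [if_neg hlt, if_neg hlt]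
      · have hM : maxCand data s (k :: ks) (dget data j) = maxCand data s ks (dget data j) := by
          unfold maxCand
          rw [List.map_cons, List.filter_cons_of_neg (by simpa using hks)]
        rw [hM]
        by_cases hlt : dget data j < maxCand data s ks (dget data j)
        · rw [if_pos hlt, if_pos hlt]
          have hMs : maxCand data s ks (dget data j) ≤ s := by
            rcases foldl_max_choice ((ks.map (dget data)).filter (fun v => decide (v ≤ s)))
              (dget data j) with h | h
            · exact absurd h (by unfold maxCand at hlt; omega)
            · have := (List.mem_filter.mp h).2
              simpa [maxCand] using this
          unfold firstAt
          rw [List.find?_cons_of_neg (by simp; omega)]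
        · rw [if_neg hlt, if_neg hlt]

lemma endFold (data : List Int) (e : Int) :
    ∀ (ks : List Nat) (j : Nat),
      ks.foldl (fun (a : Int) (k : Nat) =>
          if dget data k ≥ e ∧ dget data k < pvGetv data a then ((k : Nat) : Int) else a) ((j : Nat) : Int)
      = (if minCand data e ks (dget data j) < dget data j
         then firstAt data ks (minCand data e ks (dget data j)) else ((j : Nat) : Int)) := by
  intro ks
  induction ks with
  | nil => intro j; simp [minCand]
  | cons k ks ih =>
    intro j
    rw [List.foldl_cons]
    simp only [pvGetv_natCast]
    by_cases hc : dget data k ≥ e ∧ dget data k < dget data j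
    · rw [if_pos hc, ih k]
      have hM : minCand data e (k :: ks) (dget data j) = minCand data e ks (dget data k) := by
        unfold minCand
        rw [List.map_cons, List.filter_cons_of_pos (by simpa using hc.1), List.foldl_cons,
          min_eq_right (le_of_lt hc.2)]
      rw [hM]
      have hk_le : minCand data e ks (dget data k) ≤ dget data k := foldl_min_le _ _
      rcases eq_or_lt_of_le hk_le with he | hlt
      · rw [if_neg (by omega), if_pos (by omega)]
        unfold firstAt
        rw [List.find?_cons_of_pos (by simp [he])]
        rfl
      · rw [if_pos hlt, if_pos (lt_trans hlt hc.2)]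
        unfold firstAt
        rw [List.find?_cons_of_neg (by simp; exact fun h => absurd h.symm (ne_of_lt hlt))]
    · rw [if_neg hc, ih j]
      by_cases hks : dget data k ≥ e
      · have hjk : dget data j ≤ dget data k := by
          rcases not_and_or.mp hc with h | h
          · exact absurd hks h
          · omega
        have hM : minCand data e (k :: ks) (dget data j) = minCand data e ks (dget data j) := by
          unfold minCand
          rw [List.map_cons, List.filter_cons_of_pos (by simpa using hks), List.foldl_cons,
            min_eq_left hjk]
        rw [hM]
        by_cases hlt : minCand data e ks (dget data j) < dget data j
        · rw [if_pos hlt, if_pos hlt]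
          unfold firstAt
          rw [List.find?_cons_of_neg (by simp; omega)]
        · rw [if_neg hlt, if_neg hlt]
      · have hM : minCand data e (k :: ks) (dget data j) = minCand data e ks (dget data j) := by
          unfold minCand
          rw [List.map_cons, List.filter_cons_of_neg (by simpa using hks)]
        rw [hM]
        by_cases hlt : minCand data e ks (dget data j) < dget data j
        · rw [if_pos hlt, if_pos hlt]
          have hMs : e ≤ minCand data e ks (dget data j) := by
            rcases foldl_min_choice ((ks.map (dget data)).filter (fun v => decide (v ≥ e)))
              (dget data j) with h | h
            · exact absurd h (by unfold minCand at hlt; omega)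
            · have := (List.mem_filter.mp h).2
              simpa [minCand] using this
          unfold firstAt
          rw [List.find?_cons_of_neg (by simp; omega)]
        · rw [if_neg hlt, if_neg hlt]

lemma find?_range_eq_index? (data : List Int) (M : Int) :
    (List.range data.length).find? (fun k => dget data k == M) = PySem.List.index? data M := by
  induction data with
  | nil => rfl
  | cons d t ih =>
    rw [List.length_cons, List.range_succ_eq_map]
    by_cases h : d = M
    · rw [List.find?_cons_of_pos (by simp [dget, h]), h, PySem.List.index?_cons_self]
    · rw [List.find?_cons_of_neg (by simp [dget, h]), List.find?_map,
        PySem.List.index?_cons_of_ne _ h]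
      have : ((fun k => dget (d :: t) k == M) ∘ Nat.succ) = (fun k => dget t k == M) := by
        funext k; simp [dget]
      rw [this, ih]

lemma map_dget_range (data : List Int) : (List.range data.length).map (dget data) = data := by
  apply List.ext_getElem
  · simp
  · intro i h1 h2
    simp [dget, List.getElem?_eq_getElem h2]

lemma foldl_min_factor (r : List Int) (b x : Int) :
    r.foldl min (min b x) = min b (r.foldl min x) := by
  induction r generalizing x with
  | nil => rfl
  | cons y r ih => rw [List.foldl_cons, List.foldl_cons, min_assoc, ih]

lemma dget_last (d0 : Int) (t : List Int) :
    dget (d0 :: t) t.length = (d0 :: t).getLast (List.cons_ne_nil d0 t) := by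
  have h : t.length < (d0 :: t).length := by simp
  rw [List.getLast_eq_getElem]
  simp [dget]
  rfl

-- ===== VERDICT (by name: the statement is the Claim_ definition above) =====
theorem getStartEndIndex_spec : Claim_equal_getStartEndIndex := by
  unfold Claim_equal_getStartEndIndex Spec_getStartEndIndex
  intro data s e _
  cases data with
  | nil => rfl
  | cons d0 t =>
    unfold getStartEndIndex
    rw [PySem.List.pyRange_one]
    have hlen : ((((d0 :: t).length : Int) - 0).toNat) = t.length + 1 := by simp
    rw [hlen, List.foldl_map]
    have hfun : (fun (st : Int × Int) (k : Nat) =>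
        (fun (st : Int × Int) (i : Int) =>
          let test_value := pvGetv (d0 :: t) i
          let st1 := if test_value ≤ s ∧ test_value > pvGetv (d0 :: t) st.1 then (i, st.2) else st
          if test_value ≥ e ∧ test_value < pvGetv (d0 :: t) st1.2 then (st1.1, i) else st1) st ((0 : Int) + (k : Int)))
        = (fun (st : Int × Int) (k : Nat) =>
            ((fun (a : Int) (k : Nat) =>
              if dget (d0 :: t) k ≤ s ∧ dget (d0 :: t) k > pvGetv (d0 :: t) a then ((k : Nat) : Int) else a) st.1 k,
             (fun (a : Int) (k : Nat) =>
              if dget (d0 :: t) k ≥ e ∧ dget (d0 :: t) k < pvGetv (d0 :: t) a then ((k : Nat) : Int) else a) st.2 k)) := by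
      funext st k
      simp only [zero_add, pvGetv_natCast]
      by_cases h1 : dget (d0 :: t) k ≤ s ∧ dget (d0 :: t) k > pvGetv (d0 :: t) st.1 <;>
        by_cases h2 : dget (d0 :: t) k ≥ e ∧ dget (d0 :: t) k < pvGetv (d0 :: t) st.2 <;>
        simp [h1, h2]
    rw [hfun, foldl_pair_split (List.range (t.length + 1))
      (fun (a : Int) (k : Nat) =>
        if dget (d0 :: t) k ≤ s ∧ dget (d0 :: t) k > pvGetv (d0 :: t) a then ((k : Nat) : Int) else a)
      (fun (a : Int) (k : Nat) =>
        if dget (d0 :: t) k ≥ e ∧ dget (d0 :: t) k < pvGetv (d0 :: t) a then ((k : Nat) : Int) else a)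
      0 (((d0 :: t).length : Int) - 1)]
    have hs := startFold (d0 :: t) s (List.range (t.length + 1)) 0
    have he := endFold (d0 :: t) e (List.range (t.length + 1)) t.length
    simp only [Nat.cast_zero] at hs
    have hinit : (((d0 :: t).length : Int) - 1) = ((t.length : Nat) : Int) := by
      simp
    rw [hs, hinit, he]
    have hmax : maxCand (d0 :: t) s (List.range (t.length + 1)) d0
        = ((d0 :: t).filter (fun v => decide (v ≤ s))).foldl max d0 := by
      unfold maxCand
      rw [show t.length + 1 = (d0 :: t).length from rfl, map_dget_range]
    have hmin : minCand (d0 :: t) e (List.range (t.length + 1)) ((d0 :: t).getLast (List.cons_ne_nil d0 t))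
        = ((d0 :: t).filter (fun v => decide (v ≥ e))).foldl min
            ((d0 :: t).getLast (List.cons_ne_nil d0 t)) := by
      unfold minCand
      rw [show t.length + 1 = (d0 :: t).length from rfl, map_dget_range]
    have hfirst : ∀ M, firstAt (d0 :: t) (List.range (t.length + 1)) M
        = (((PySem.List.index? (d0 :: t) M).getD 0 : Nat) : Int) := by
      intro M
      unfold firstAt
      rw [show t.length + 1 = (d0 :: t).length from rfl, find?_range_eq_index?]
    unfold getStartEndIndex_alt
    simp only [hfirst, dget_last, show dget (d0 :: t) 0 = d0 from rfl, hinit]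
    rw [hmax, hmin]
    set last := (d0 :: t).getLast (List.cons_ne_nil d0 t) with hlast
    simp only [Prod.mk.injEq]
    constructor
    · -- start component
      by_cases hd0 : d0 ≤ s
      · have hfil : (d0 :: t).filter (fun v => decide (v ≤ s))
            = d0 :: t.filter (fun v => decide (v ≤ s)) :=
          List.filter_cons_of_pos (by simpa using hd0)
        rw [if_pos hd0, hfil, PySem.List.max?_id_cons, List.foldl_cons, max_self d0]
        simp only [Option.getD_some]
      · rw [if_neg hd0]
        have hM : ¬ d0 < ((d0 :: t).filter (fun v => decide (v ≤ s))).foldl max d0 := by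
          rcases foldl_max_choice ((d0 :: t).filter (fun v => decide (v ≤ s))) d0 with h | h
          · omega
          · have h2 := of_decide_eq_true (List.mem_filter.mp h).2
            omega
        rw [if_neg hM]
    · -- end component
      by_cases hl : last ≥ e
      · have hne : (d0 :: t).filter (fun v => decide (v ≥ e)) ≠ [] := by
          have hmem : last ∈ (d0 :: t).filter (fun v => decide (v ≥ e)) :=
            List.mem_filter.mpr ⟨List.getLast_mem _, by simpa using hl⟩
          exact List.ne_nil_of_mem hmem
        obtain ⟨x, r, hxr⟩ := List.exists_cons_of_ne_nil hne
        rw [if_pos hl, hxr, PySem.List.min?_id_cons, List.foldl_cons, foldl_min_factor]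
        simp only [Option.getD_some]
        by_cases hlt : r.foldl min x < last
        · rw [min_eq_right (le_of_lt hlt)]
        · rw [min_eq_left (by omega), if_neg (lt_irrefl last), if_neg hlt]
      · rw [if_neg hl]
        have hM : ¬ ((d0 :: t).filter (fun v => decide (v ≥ e))).foldl min last < last := by
          rcases foldl_min_choice ((d0 :: t).filter (fun v => decide (v ≥ e))) last with h | h
          · omega
          · have h2 := of_decide_eq_true (List.mem_filter.mp h).2
            omega
        rw [if_neg hM]
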